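-- pv_equiv track=rewrite | github.com/siberiacalling/computational_mathematics | lab3/lab3.py | get_dictionary_of_indexes
-- ===== SOURCE A (Python) =====
-- def get_dictionary_of_indexes(n):
--     indexes_dictionary = {}
--     index_number = 0
--
--     for i in range(n):
--         for j in range(n):
--             if i == 0 or j == 0 or i == n or j == n:
--                 pass
--             else:
--                 indexes_dictionary[(i, j)] = index_number
--                 index_number += 1
--     return indexes_dictionary
-- ===== SOURCE B (Python) =====
-- def get_dictionary_of_indexes(n):
--     m = n - 1
--     if m <= 0:
--         return {}
--     return {(k // m + 1, k % m + 1): k for k in range(m * m)}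
-- ===== Notes on version B (the rewrite author's own statement) =====
-- stated objective: alternative
-- what changed: Instead of a nested row/column scan maintaining a mutable running counter and skipping border cells, B runs a single loop over the linear index range of the interior and reconstructs each coordinate pair from the linear index by divmod.
import Mathlib
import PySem

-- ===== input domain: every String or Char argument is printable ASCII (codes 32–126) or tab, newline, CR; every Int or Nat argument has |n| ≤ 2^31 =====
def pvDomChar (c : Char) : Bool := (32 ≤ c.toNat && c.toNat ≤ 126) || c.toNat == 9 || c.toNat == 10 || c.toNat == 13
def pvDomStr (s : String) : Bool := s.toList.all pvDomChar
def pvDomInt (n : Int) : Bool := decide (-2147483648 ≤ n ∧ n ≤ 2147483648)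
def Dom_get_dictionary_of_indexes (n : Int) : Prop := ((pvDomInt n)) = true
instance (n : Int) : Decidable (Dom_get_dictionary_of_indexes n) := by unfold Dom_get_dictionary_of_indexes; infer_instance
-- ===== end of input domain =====

-- B replaces A's nested row/column scan with running counter by a single loop over the
-- linear indexes 0..(n-1)^2-1, recovering each coordinate by divmod; objective: alternative.


-- ===== PORT A =====
-- inner loop body: 'for j in range(n): if i == 0 or j == 0 or i == n or j == n: pass else: d[(i,j)] = c; c += 1'
def pvInnerA (n i : Int) (st : PySem.Dict (Int × Int) Int × Int) (j : Int) :
    PySem.Dict (Int × Int) Int × Int :=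
  if i = 0 ∨ j = 0 ∨ i = n ∨ j = n then st
  else (st.1.insert (i, j) st.2, st.2 + 1)

-- outer loop body: the whole inner 'for j in range(n)' loop for one i
def pvOuterA (n : Int) (st : PySem.Dict (Int × Int) Int × Int) (i : Int) :
    PySem.Dict (Int × Int) Int × Int :=
  (PySem.List.pyRange 0 n 1).foldl (pvInnerA n i) st

def get_dictionary_of_indexes (n : Int) : List (Int × Int × Int) :=
  let st := (PySem.List.pyRange 0 n 1).foldl (pvOuterA n) ((PySem.Dict.empty : PySem.Dict (Int × Int) Int), (0 : Int))
  st.1.items.map (fun p => (p.1.1, p.1.2, p.2))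

-- ===== PORT B =====
-- single loop over the linear index k; coordinates recovered by divmod
def get_dictionary_of_indexes_alt (n : Int) : List (Int × Int × Int) :=
  let m := n - 1
  if m ≤ 0 then []
  else (PySem.List.pyRange 0 (m * m) 1).map
    (fun k => (PySem.Int.floordiv k m + 1, PySem.Int.mod k m + 1, k))

-- ===== PRECONDITION & SPEC =====
def Spec_get_dictionary_of_indexes (n : Int) (out : List (Int × Int × Int)) : Prop := out = get_dictionary_of_indexes_alt n
instance (n : Int) (out : List (Int × Int × Int)) : Decidable (Spec_get_dictionary_of_indexes n out) := by unfold Spec_get_dictionary_of_indexes; infer_instance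

-- ===== CLAIM (what is proved, stated in full; the proofs are below) =====
def Claim_equal_get_dictionary_of_indexes : Prop := ∀ (n : Int), Dom_get_dictionary_of_indexes n → Spec_get_dictionary_of_indexes n (get_dictionary_of_indexes n)

-- ===== LEMMAS AND PROOFS =====

-- with i = 0 every inner step is a no-op
lemma pvInnerA_zero (n : Int) (l : List Int) (st : PySem.Dict (Int × Int) Int × Int) :
    l.foldl (pvInnerA n 0) st = st := by
  induction l generalizing st with
  | nil => rfl
  | cons x xs ih => simp [List.foldl_cons, pvInnerA, ih]

-- inner loop from column a: appends row entries ((i,j), c + (j - a)) for j in [a, n)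
lemma pvInnerA_run (n i : Int) (hi1 : 1 ≤ i) (hin : i < n) :
    ∀ (k : Nat) (a : Int), (n - a).toNat = k → 1 ≤ a → a ≤ n →
    ∀ (d : PySem.Dict (Int × Int) Int) (c : Int),
    (∀ j, a ≤ j → d.contains (i, j) = false) →
    ((PySem.List.pyRange a n 1).foldl (pvInnerA n i) (d, c)).1.items
        = d.items ++ (PySem.List.pyRange a n 1).map (fun j => ((i, j), c + (j - a)))
    ∧ ((PySem.List.pyRange a n 1).foldl (pvInnerA n i) (d, c)).2 = c + (n - a) := by
  intro k
  induction k with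
  | zero =>
    intro a hk h1 hn d c hf
    have he : PySem.List.pyRange a n 1 = [] := by
      rw [PySem.List.pyRange_one]
      have h0 : (n - a).toNat = 0 := by omega
      rw [h0]
      rfl
    rw [he]
    refine ⟨by simp, ?_⟩
    show c = c + (n - a)
    omega
  | succ k ih =>
    intro a hk h1 hn d c hf
    have han : a < n := by omega
    rw [PySem.List.pyRange_one_cons han]
    have hcond : ¬ (i = 0 ∨ a = 0 ∨ i = n ∨ a = n) := by omega
    have hstep : pvInnerA n i (d, c) a = (d.insert (i, a) c, c + 1) := by
      simp [pvInnerA, hcond]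
    rw [List.foldl_cons, hstep]
    have hfresh : d.contains (i, a) = false := hf a le_rfl
    have hf' : ∀ j, a + 1 ≤ j → (d.insert (i, a) c).contains (i, j) = false := by
      intro j hj
      rw [PySem.Dict.contains_insert]
      have : ((i, j) == (i, a)) = false := by
        rw [beq_eq_false_iff_ne]
        simp only [ne_eq, Prod.mk.injEq, not_and]
        omega
      simp [this, hf j (by omega)]
    obtain ⟨hitems, hcnt⟩ := ih (a + 1) (by omega) (by omega) (by omega)
      (d.insert (i, a) c) (c + 1) hf'
    refine ⟨?_, by rw [hcnt]; ring⟩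
    rw [hitems, PySem.Dict.items_insert_of_not_contains d c hfresh]
    rw [List.append_assoc]
    congr 1
    rw [List.map_cons]
    simp only [List.singleton_append]
    have hhead : ((i, a), c) = ((i, a), c + (a - a)) := by norm_num
    rw [hhead]
    congr 1
    apply List.map_congr_left
    intro j hj
    have : c + 1 + (j - (a + 1)) = c + (j - a) := by ring
    simp [this]

-- one full inner loop (columns 0..n-1) for a row i with 1 ≤ i < n
lemma pvOuterA_step (n i : Int) (hi1 : 1 ≤ i) (hin : i < n)
    (d : PySem.Dict (Int × Int) Int) (c : Int)
    (hf : ∀ j, 1 ≤ j → d.contains (i, j) = false) :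
    (pvOuterA n (d, c) i).1.items
        = d.items ++ (PySem.List.pyRange 1 n 1).map (fun j => ((i, j), c + (j - 1)))
    ∧ (pvOuterA n (d, c) i).2 = c + (n - 1) := by
  unfold pvOuterA
  have hn0 : (0 : Int) < n := by omega
  rw [PySem.List.pyRange_one_cons hn0, List.foldl_cons]
  have h0 : pvInnerA n i (d, c) 0 = (d, c) := by simp [pvInnerA]
  rw [h0]
  exact pvInnerA_run n i hi1 hin (n - 1).toNat 1 (by omega) le_rfl (by omega) d c hf

-- outer loop from row a: appends all rows a..n-1 with closed-form values
lemma pvOuterA_run (n : Int) :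
    ∀ (k : Nat) (a : Int), (n - a).toNat = k → 1 ≤ a → a ≤ n →
    ∀ (d : PySem.Dict (Int × Int) Int) (c : Int),
    (∀ i j, a ≤ i → d.contains (i, j) = false) →
    ((PySem.List.pyRange a n 1).foldl (pvOuterA n) (d, c)).1.items
        = d.items ++ (PySem.List.pyRange a n 1).flatMap (fun i =>
            (PySem.List.pyRange 1 n 1).map (fun j => ((i, j), c + (i - a) * (n - 1) + (j - 1)))) := by
  intro k
  induction k with
  | zero =>
    intro a hk h1 hn d c hf
    have he : PySem.List.pyRange a n 1 = [] := by
      rw [PySem.List.pyRange_one]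
      have h0 : (n - a).toNat = 0 := by omega
      rw [h0]
      rfl
    rw [he]
    simp
  | succ k ih =>
    intro a hk h1 hn d c hf
    have han : a < n := by omega
    rw [PySem.List.pyRange_one_cons han, List.foldl_cons]
    have hrow := pvOuterA_step n a h1 han d c (fun j _ => hf a j le_rfl)
    have hst : pvOuterA n (d, c) a
        = ((pvOuterA n (d, c) a).1, (pvOuterA n (d, c) a).2) := rfl
    have hf' : ∀ i j, a + 1 ≤ i → (pvOuterA n (d, c) a).1.contains (i, j) = false := by
      intro i j hij
      have hc : (pvOuterA n (d, c) a).1.contains (i, j)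
          = (pvOuterA n (d, c) a).1.items.any (fun p => p.1 == (i, j)) := rfl
      have hd : d.contains (i, j) = d.items.any (fun p => p.1 == (i, j)) := rfl
      rw [hc, hrow.1, List.any_append, ← hd, hf i j (by omega), Bool.false_or,
        List.any_eq_false]
      intro p hp
      simp only [List.mem_map] at hp
      obtain ⟨j', _, rfl⟩ := hp
      simp only [beq_iff_eq, Prod.mk.injEq, not_and]
      omega
    have hih := ih (a + 1) (by omega) (by omega) (by omega)
      (pvOuterA n (d, c) a).1 (pvOuterA n (d, c) a).2 hf'
    rw [hst, hih, hrow.1, hrow.2, List.flatMap_cons, ← List.append_assoc]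
    congr 1
    congr 1
    · apply List.map_congr_left
      intro j hj
      have : c + (j - 1) = c + (a - a) * (n - 1) + (j - 1) := by ring
      simp [this]
    · apply List.flatMap_congr
      intro i hi
      apply List.map_congr_left
      intro j hj
      have : c + (n - 1) + (i - (a + 1)) * (n - 1) + (j - 1)
          = c + (i - a) * (n - 1) + (j - 1) := by ring
      simp [this]

-- A's result in closed form, for 1 ≤ n
lemma pvA_closed (n : Int) (hn : 1 ≤ n) :
    get_dictionary_of_indexes n
      = (PySem.List.pyRange 1 n 1).flatMap (fun i =>
          (PySem.List.pyRange 1 n 1).map (fun j => (i, j, (i - 1) * (n - 1) + (j - 1)))) := by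
  unfold get_dictionary_of_indexes
  rw [PySem.List.pyRange_one_cons (by omega : (0:Int) < n), List.foldl_cons]
  have h0 : pvOuterA n (PySem.Dict.empty, 0) 0 = (PySem.Dict.empty, 0) := by
    unfold pvOuterA; exact pvInnerA_zero n _ _
  rw [h0]
  simp only [zero_add]
  have hrun := pvOuterA_run n (n - 1).toNat 1 (by omega) le_rfl hn PySem.Dict.empty 0
    (by intro i j _; exact PySem.Dict.contains_empty _)
  simp only [PySem.Dict.empty] at hrun ⊢
  rw [hrun]
  simp only [List.nil_append, List.map_flatMap, List.map_map]
  apply List.flatMap_congr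
  intro i hi
  apply List.map_congr_left
  intro j hj
  simp

-- one row of B's linear scan: k in [q*m, (q+1)*m) is row q+1 with columns recovered by divmod
lemma pvB_row (m q : Int) (hm : 0 < m) :
    (PySem.List.pyRange (q * m) ((q + 1) * m) 1).map
        (fun k => (PySem.Int.floordiv k m + 1, PySem.Int.mod k m + 1, k))
      = (PySem.List.pyRange 1 (m + 1) 1).map (fun j => (q + 1, j, q * m + (j - 1))) := by
  rw [PySem.List.pyRange_one, PySem.List.pyRange_one]
  have h1 : ((q + 1) * m - q * m).toNat = m.toNat := by
    have : (q + 1) * m - q * m = m := by ring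
    rw [this]
  have h2 : (m + 1 - 1).toNat = m.toNat := by norm_num
  rw [h1, h2, List.map_map, List.map_map]
  apply List.map_congr_left
  intro k hk
  have hk' : (k : Int) < m := by
    rw [List.mem_range] at hk; omega
  have hk0 : (0 : Int) ≤ (k : Int) := Int.natCast_nonneg k
  have hdiv : PySem.Int.floordiv (q * m + k) m = q := by
    rw [PySem.Int.floordiv_eq_iff_of_pos hm]
    constructor
    · omega
    · have : (q + 1) * m = q * m + m := by ring
      omega
  have hmul := PySem.Int.floordiv_mul_add_mod (q * m + k) m
  rw [hdiv] at hmul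
  have hmod : PySem.Int.mod (q * m + k) m = k := by omega
  simp only [Function.comp_apply, hdiv, hmod, Prod.mk.injEq]
  exact ⟨trivial, by omega, by omega⟩

-- B's linear scan over t rows starting at row offset a equals the nested closed form
lemma pvB_rows (m : Int) (hm : 0 < m) :
    ∀ (t : Nat) (a : Int),
    (PySem.List.pyRange (a * m) ((a + t) * m) 1).map
        (fun k => (PySem.Int.floordiv k m + 1, PySem.Int.mod k m + 1, k))
      = (PySem.List.pyRange (a + 1) (a + 1 + t) 1).flatMap (fun i =>
          (PySem.List.pyRange 1 (m + 1) 1).map (fun j => (i, j, (i - 1) * m + (j - 1)))) := by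
  intro t
  induction t with
  | zero =>
    intro a
    have h1 : PySem.List.pyRange (a * m) ((a + (0:Nat)) * m) 1 = [] := by
      apply PySem.List.pyRange_one_eq_nil
      simp
    have h2 : PySem.List.pyRange (a + 1) (a + 1 + (0:Nat)) 1 = [] := by
      apply PySem.List.pyRange_one_eq_nil
      simp
    rw [h1, h2]
    rfl
  | succ t ih =>
    intro a
    simp only [Nat.cast_add, Nat.cast_one]
    rw [show a + ((t : Int) + 1) = a + 1 + (t : Int) from by ring,
        show a + 1 + ((t : Int) + 1) = a + 1 + 1 + (t : Int) from by ring]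
    have h1 : a * m ≤ (a + 1) * m := by nlinarith
    have h2 : (a + 1) * m ≤ (a + 1 + (t : Int)) * m := by
      nlinarith [Int.natCast_nonneg t]
    rw [PySem.List.pyRange_one_append _ _ _ h1 h2,
        List.map_append, pvB_row m a hm,
        PySem.List.pyRange_one_cons
          (show a + 1 < a + 1 + 1 + (t : Int) from by
            have := Int.natCast_nonneg t; omega),
        List.flatMap_cons, ih (a + 1)]
    congr 1
    apply List.map_congr_left
    intro j hj
    norm_num

-- ===== VERDICT (by name: the statement is the Claim_ definition above) =====
theorem get_dictionary_of_indexes_spec : Claim_equal_get_dictionary_of_indexes := by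
  intro n _
  unfold Spec_get_dictionary_of_indexes get_dictionary_of_indexes_alt
  by_cases hm : n - 1 ≤ 0
  · simp only [hm, if_true]
    by_cases hn : 1 ≤ n
    · rw [pvA_closed n hn]
      have : PySem.List.pyRange 1 n 1 = [] := PySem.List.pyRange_one_eq_nil (by omega)
      rw [this]
      rfl
    · unfold get_dictionary_of_indexes
      have : PySem.List.pyRange 0 n 1 = [] := PySem.List.pyRange_one_eq_nil (by omega)
      rw [this]
      rfl
  · simp only [hm, if_false]
    have hm' : 0 < n - 1 := by omega
    have hrows := pvB_rows (n - 1) hm' (n - 1).toNat 0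
    have hcast : ((n - 1).toNat : Int) = n - 1 := by omega
    rw [hcast] at hrows
    simp only [zero_mul, zero_add] at hrows
    rw [pvA_closed n (by omega)]
    have hn1 : (1:Int) + (n - 1) = n := by ring
    have hn2 : n - 1 + 1 = n := by ring
    rw [hn1, hn2] at hrows
    exact hrows.symm
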